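-- pv_equiv track=rewrite | github.com/willyclayton/the-bracket-lab | super_agent/src/master_outputs.py | get_year_games
-- ===== SOURCE A (Python) =====
-- def get_year_games(all_games, year):
--     """Extract all games for a given year, organized by round."""
--     year_games = [g for g in all_games if g["year"] == year]
--     by_round = {}
--     for g in year_games:
--         rnd = g["round"]
--         if rnd not in by_round:
--             by_round[rnd] = []
--         by_round[rnd].append(g)
--     # Sort each round by game_id
--     for rnd in by_round:
--         by_round[rnd].sort(key=lambda g: g["game_id"])
--     return by_round
-- ===== SOURCE B (Python) =====
-- def get_year_games(all_games, year):
--     """Extract all games for a given year, organized by round."""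
--     year_games = [g for g in all_games if g["year"] == year]
--     # round keys in first-occurrence order, one global stable sort, then one filter per round
--     rounds = list(dict.fromkeys(g["round"] for g in year_games))
--     ordered = sorted(year_games, key=lambda g: g["game_id"])
--     return {r: [g for g in ordered if g["round"] == r] for r in rounds}
-- ===== Notes on version B (the rewrite author's own statement) =====
-- stated objective: alternative
-- what changed: Replaces A's incremental dict build with per-round in-place sorts by one global stable sort of the year-filtered list plus a dedup of round keys and one filter per round (stability makes each round's filtered slice equal A's per-round sort).
import Mathlib
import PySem

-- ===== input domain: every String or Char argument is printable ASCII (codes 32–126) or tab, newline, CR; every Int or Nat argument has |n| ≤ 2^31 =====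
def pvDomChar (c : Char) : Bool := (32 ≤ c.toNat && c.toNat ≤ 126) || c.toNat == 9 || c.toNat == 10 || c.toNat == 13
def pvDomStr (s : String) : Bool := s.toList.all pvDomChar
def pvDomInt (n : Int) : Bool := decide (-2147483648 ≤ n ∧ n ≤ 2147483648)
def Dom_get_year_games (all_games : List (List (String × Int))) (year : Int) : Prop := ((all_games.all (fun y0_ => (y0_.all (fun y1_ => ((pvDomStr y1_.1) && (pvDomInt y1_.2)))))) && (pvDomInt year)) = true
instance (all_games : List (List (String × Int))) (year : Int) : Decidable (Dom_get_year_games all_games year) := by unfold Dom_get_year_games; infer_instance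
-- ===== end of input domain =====

-- B replaces A's incremental dict build + per-round sorts by one global stable sort, a dedup of
-- round keys and one filter per round (alternative decomposition, same complexity class).


-- shared helper: g[k] for a game dict (value when present; Pre_ guarantees presence where A reads)
def pvKey (g : List (String × Int)) (k : String) : Int :=
  PySem.Dict.getD (PySem.Dict.mk g) k 0

-- ===== PORT A =====
def get_year_games (all_games : List (List (String × Int))) (year : Int) : List (Int × List (List (String × Int))) :=
  let year_games := all_games.filter (fun g => pvKey g "year" == year)
  let by_round : PySem.Dict Int (List (List (String × Int))) :=
    year_games.foldl (fun d g =>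
      let rnd := pvKey g "round"
      let d := if d.contains rnd then d else d.insert rnd []
      d.insert rnd (d.getD rnd [] ++ [g])) (PySem.Dict.mk [])
  by_round.items.map (fun p => (p.1, PySem.List.sorted p.2 (fun g => pvKey g "game_id") false))

-- ===== PORT B =====
def get_year_games_alt (all_games : List (List (String × Int))) (year : Int) : List (Int × List (List (String × Int))) :=
  let year_games := all_games.filter (fun g => pvKey g "year" == year)
  let rounds := PySem.List.dedup (year_games.map (fun g => pvKey g "round"))
  let ordered := PySem.List.sorted year_games (fun g => pvKey g "game_id") false
  rounds.map (fun r => (r, ordered.filter (fun g => pvKey g "round" == r)))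

-- ===== PRECONDITION & SPEC =====
-- Pre_ excludes exactly the inputs where the Python raises KeyError: a game without a "year" key,
-- or a game of the requested year without a "round" or "game_id" key.
def Pre_get_year_games (all_games : List (List (String × Int))) (year : Int) : Prop :=
  ∀ g ∈ all_games, (PySem.Dict.mk g).contains "year" = true ∧
    (PySem.Dict.get? (PySem.Dict.mk g) "year" = some year →
      (PySem.Dict.mk g).contains "round" = true ∧ (PySem.Dict.mk g).contains "game_id" = true)
instance (all_games : List (List (String × Int))) (year : Int) : Decidable (Pre_get_year_games all_games year) := by unfold Pre_get_year_games; infer_instance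

def pvWitness_get_year_games : (List (List (String × Int))) × Int :=
  ([[("year", 2024), ("round", 1), ("game_id", 2)],
    [("year", 2024), ("round", 1), ("game_id", 1)],
    [("year", 2023), ("round", 2), ("game_id", 3)]], 2024)

def Spec_get_year_games (all_games : List (List (String × Int))) (year : Int) (out : List (Int × List (List (String × Int)))) : Prop := out = get_year_games_alt all_games year
instance (all_games : List (List (String × Int))) (year : Int) (out : List (Int × List (List (String × Int)))) : Decidable (Spec_get_year_games all_games year out) := by unfold Spec_get_year_games; infer_instance

-- ===== CLAIM (what is proved, stated in full; the proofs are below) =====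
def Claim_equal_get_year_games : Prop := ∀ (all_games : List (List (String × Int))) (year : Int), Dom_get_year_games all_games year → Pre_get_year_games all_games year → Spec_get_year_games all_games year (get_year_games all_games year)

-- ===== LEMMAS AND PROOFS =====

-- insertion by strict key order keeps a ≤-sorted list ≤-sorted
lemma pairwise_insertBy {α : Type} (key : α → Int) (x : α) (ys : List α)
    (h : ys.Pairwise (fun a b => key a ≤ key b)) :
    (PySem.List.insertBy (fun a b => decide (key a < key b)) x ys).Pairwise (fun a b => key a ≤ key b) := by
  induction ys with
  | nil => simp [PySem.List.insertBy]
  | cons y ys ih =>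
    simp only [PySem.List.insertBy]
    rcases List.pairwise_cons.1 h with ⟨hy, ht⟩
    by_cases hxy : key x < key y
    · simp only [hxy, decide_true, if_true]
      refine List.pairwise_cons.2 ⟨?_, h⟩
      intro b hb
      rw [List.mem_cons] at hb
      rcases hb with hb | hb
      · subst hb; omega
      · have := hy b hb; omega
    · simp only [hxy, decide_false]
      refine List.pairwise_cons.2 ⟨?_, ih ht⟩
      intro b hb
      rcases (PySem.List.mem_insertBy _ _ _ _).1 hb with hb | hb
      · subst hb; omega
      · exact hy b hb

-- on a ≤-sorted list, filtering commutes with key-ordered insertion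
lemma filter_insertBy {α : Type} (p : α → Bool) (key : α → Int) (x : α) (ys : List α)
    (h : ys.Pairwise (fun a b => key a ≤ key b)) :
    (PySem.List.insertBy (fun a b => decide (key a < key b)) x ys).filter p =
      if p x then PySem.List.insertBy (fun a b => decide (key a < key b)) x (ys.filter p)
      else ys.filter p := by
  induction ys with
  | nil => cases hx : p x <;> simp [PySem.List.insertBy, List.filter, hx]
  | cons y ys ih =>
    rcases List.pairwise_cons.1 h with ⟨hy, ht⟩
    simp only [PySem.List.insertBy]
    by_cases hxy : key x < key y
    · simp only [hxy, decide_true, if_true]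
      -- x goes to the front; every kept element of y::ys has key > key x
      have hfront : ∀ zs : List α, (∀ z ∈ zs, key x < key z) →
          PySem.List.insertBy (fun a b => decide (key a < key b)) x zs = x :: zs := by
        intro zs hz
        cases zs with
        | nil => simp [PySem.List.insertBy]
        | cons z zs => simp [PySem.List.insertBy, hz z (by simp)]
      cases hx : p x
      · cases hpy : p y <;> simp [List.filter, hx, hpy]
      · have : ∀ z ∈ (y :: ys).filter p, key x < key z := by
          intro z hz
          have hz' := List.mem_of_mem_filter hz
          rw [List.mem_cons] at hz'
          rcases hz' with hz' | hz'
          · subst hz'; omega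
          · have := hy z hz'; omega
        rw [hfront _ this]
        simp [List.filter, hx]
    · simp only [hxy, decide_false]
      cases hx : p x
      · cases hpy : p y <;> simp [List.filter, hx, hpy, ih ht]
      · cases hpy : p y
        · simp [List.filter, hpy, ih ht, hx]
        · simp only [PySem.List.insertBy, hxy, decide_false, Bool.false_eq_true, if_false,
            List.filter_cons, hpy, if_true]
          rw [ih ht]
          simp [hx]

-- the commuting property lifted along the insertion-sort fold
lemma filter_foldl_insertBy {α : Type} (p : α → Bool) (key : α → Int) (l acc : List α)
    (h : acc.Pairwise (fun a b => key a ≤ key b)) :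
    (l.foldl (fun a x => PySem.List.insertBy (fun a b => decide (key a < key b)) x a) acc).filter p =
      (l.filter p).foldl (fun a x => PySem.List.insertBy (fun a b => decide (key a < key b)) x a) (acc.filter p) := by
  induction l generalizing acc with
  | nil => simp
  | cons x l ih =>
    simp only [List.foldl_cons]
    rw [ih _ (pairwise_insertBy key x acc h), filter_insertBy p key x acc h]
    cases hx : p x <;> simp [List.filter, hx]

-- filtering commutes with the stable sort
lemma filter_sorted {α : Type} (p : α → Bool) (key : α → Int) (xs : List α) :
    (PySem.List.sorted xs (fun g => key g) false).filter p =
      PySem.List.sorted (xs.filter p) (fun g => key g) false := by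
  rw [PySem.List.sorted_eq_foldl_insertBy, PySem.List.sorted_eq_foldl_insertBy]
  simpa using filter_foldl_insertBy p key xs [] List.Pairwise.nil


-- first match of a key scan over the grouped association list
lemma find?_fst_map {β : Type} (rs : List Int) (v : Int → β) (rnd : Int) (h : rnd ∈ rs) :
    List.find? (fun p => p.1 == rnd) (rs.map (fun r => (r, v r))) = some (rnd, v rnd) := by
  induction rs with
  | nil => cases h
  | cons r rs ih =>
    rw [List.mem_cons] at h
    by_cases hr : r = rnd
    · subst hr; simp
    · have hb : (r == rnd) = false := beq_eq_false_iff_ne.2 hr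
      simp only [List.map_cons, List.find?, hb]
      exact ih (h.resolve_left (fun h' => hr h'.symm))

lemma any_fst_map {β : Type} (rs : List Int) (v : Int → β) (rnd : Int) :
    (rs.map (fun r => (r, v r))).any (fun p => p.1 == rnd) = rs.any (fun r => r == rnd) := by
  induction rs with
  | nil => rfl
  | cons r rs ih => simp only [List.map_cons, List.any_cons, ih]

lemma dedup_append_singleton (xs : List Int) (x : Int) :
    PySem.List.dedup (xs ++ [x]) =
      if x ∈ PySem.List.dedup xs then PySem.List.dedup xs else PySem.List.dedup xs ++ [x] := by
  simp only [PySem.List.dedup]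
  rw [PySem.Set.ofList_eq_foldl, List.foldl_append, ← PySem.Set.ofList_eq_foldl]
  show PySem.Set.add _ x = _
  unfold PySem.Set.add
  by_cases hx : x ∈ PySem.Set.ofList xs
  · rw [if_pos ((PySem.Set.contains_iff _ _).2 hx), if_pos hx]
  · rw [if_neg (fun hc => hx ((PySem.Set.contains_iff _ _).1 hc)), if_neg hx]

lemma group_step (f : List (String × Int) → Int) (pref : List (List (String × Int))) (g : List (String × Int)) :
    (if (PySem.Dict.mk ((PySem.List.dedup (pref.map f)).map
          (fun r => (r, pref.filter (fun g' => f g' == r))))).contains (f g) = true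
       then PySem.Dict.mk ((PySem.List.dedup (pref.map f)).map
          (fun r => (r, pref.filter (fun g' => f g' == r))))
       else (PySem.Dict.mk ((PySem.List.dedup (pref.map f)).map
          (fun r => (r, pref.filter (fun g' => f g' == r))))).insert (f g) []).insert (f g)
      ((if (PySem.Dict.mk ((PySem.List.dedup (pref.map f)).map
          (fun r => (r, pref.filter (fun g' => f g' == r))))).contains (f g) = true
       then PySem.Dict.mk ((PySem.List.dedup (pref.map f)).map
          (fun r => (r, pref.filter (fun g' => f g' == r))))
       else (PySem.Dict.mk ((PySem.List.dedup (pref.map f)).map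
          (fun r => (r, pref.filter (fun g' => f g' == r))))).insert (f g) []).getD (f g) [] ++ [g]) =
    PySem.Dict.mk ((PySem.List.dedup ((pref ++ [g]).map f)).map
        (fun r => (r, (pref ++ [g]).filter (fun g' => f g' == r)))) := by
  have hmapapp : (pref ++ [g]).map f = pref.map f ++ [f g] := by simp
  by_cases hin : f g ∈ PySem.List.dedup (pref.map f)
  · -- round already present: pure overwrite of that entry
    have hcont : (PySem.Dict.mk ((PySem.List.dedup (pref.map f)).map
        (fun r => (r, pref.filter (fun g' => f g' == r))))).contains (f g) = true := by
      simp only [PySem.Dict.contains, any_fst_map, List.any_eq_true]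
      exact ⟨f g, hin, by simp⟩
    rw [if_pos hcont]
    have hget : (PySem.Dict.mk ((PySem.List.dedup (pref.map f)).map
        (fun r => (r, pref.filter (fun g' => f g' == r))))).getD (f g) [] =
        pref.filter (fun g' => f g' == f g) := by
      simp only [PySem.Dict.getD, PySem.Dict.get?]
      rw [find?_fst_map _ _ _ hin]
      rfl
    rw [hget]
    simp only [PySem.Dict.insert, hcont, if_pos]
    rw [hmapapp, dedup_append_singleton, if_pos hin]
    rw [PySem.Dict.mk.injEq, List.map_map]
    refine List.map_congr_left ?_
    intro r hr
    by_cases hrr : r = f g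
    · subst hrr
      simp [List.filter_append]
    · have h1 : (r == f g) = false := beq_eq_false_iff_ne.2 hrr
      have h2 : (f g == r) = false := beq_eq_false_iff_ne.2 (fun h => hrr h.symm)
      simp [Function.comp, h1, List.filter_append, h2]
  · -- new round: a fresh entry appended at the end
    have hnotpref : f g ∉ pref.map f := fun h => hin ((PySem.List.mem_dedup _ _).2 h)
    have hkeys : ∀ r ∈ PySem.List.dedup (pref.map f), (r == f g) = false := by
      intro r hr
      exact beq_eq_false_iff_ne.2 (fun h => hin (h ▸ hr))
    have hcont : (PySem.Dict.mk ((PySem.List.dedup (pref.map f)).map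
        (fun r => (r, pref.filter (fun g' => f g' == r))))).contains (f g) = false := by
      simp only [PySem.Dict.contains, any_fst_map, List.any_eq_false]
      intro r hr
      simp [hkeys r hr]
    rw [if_neg (by simp only [hcont]; simp)]
    simp only [PySem.Dict.insert, hcont, Bool.false_eq_true, if_false]
    have hcont2 : (PySem.Dict.mk ((PySem.List.dedup (pref.map f)).map
        (fun r => (r, pref.filter (fun g' => f g' == r))) ++ [(f g, ([] : List (List (String × Int))))])).contains (f g) = true := by
      simp only [PySem.Dict.contains, List.any_append]
      simp
    have hget2 : (PySem.Dict.mk ((PySem.List.dedup (pref.map f)).map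
        (fun r => (r, pref.filter (fun g' => f g' == r))) ++ [(f g, ([] : List (List (String × Int))))])).getD (f g) [] = [] := by
      simp only [PySem.Dict.getD, PySem.Dict.get?, List.find?_append]
      rw [List.find?_eq_none.2 (by
        intro p hp
        rcases List.mem_map.1 hp with ⟨r, hr, rfl⟩
        simp [hkeys r hr])]
      simp
    rw [hget2]
    simp only [hcont2, if_pos, List.map_append, List.map_map]
    rw [show List.map f [g] = [f g] from rfl, dedup_append_singleton, if_neg hin]
    rw [PySem.Dict.mk.injEq, List.map_append]
    congr 1
    · refine List.map_congr_left ?_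
      intro r hr
      have h2 : (f g == r) = false := by
        have := hkeys r hr
        exact beq_eq_false_iff_ne.2 (fun h => (beq_eq_false_iff_ne.1 this) h.symm)
      simp [Function.comp, hkeys r hr, List.filter_append, h2]
    · have hempty : pref.filter (fun g' => f g' == f g) = [] := by
        rw [List.filter_eq_nil_iff]
        intro a ha hb
        exact hnotpref (beq_iff_eq.1 hb ▸ List.mem_map_of_mem ha)
      simp [List.filter_append, hempty]

-- A's grouping fold, characterised: keys are the deduped rounds in first-occurrence order,
-- each value is the round's filtered sublist, in input order
lemma group_foldl (f : List (String × Int) → Int) (l pref : List (List (String × Int))) :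
    l.foldl (fun d g =>
        let rnd := f g
        let d := if d.contains rnd then d else d.insert rnd []
        d.insert rnd (d.getD rnd [] ++ [g]))
      (PySem.Dict.mk ((PySem.List.dedup (pref.map f)).map
        (fun r => (r, pref.filter (fun g => f g == r))))) =
    PySem.Dict.mk ((PySem.List.dedup ((pref ++ l).map f)).map
        (fun r => (r, (pref ++ l).filter (fun g => f g == r)))) := by
  induction l generalizing pref with
  | nil => simp
  | cons g l ih =>
    simp only [List.foldl_cons]
    rw [group_step f pref g, ih (pref ++ [g])]
    simp

-- ===== VERDICT (by name: the statement is the Claim_ definition above) =====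
theorem get_year_games_spec : Claim_equal_get_year_games := by
  intro all_games year _ _
  unfold Spec_get_year_games get_year_games get_year_games_alt
  have hgrp := group_foldl (fun g => pvKey g "round")
      (all_games.filter (fun g => pvKey g "year" == year)) []
  simp only [List.map_nil, List.nil_append] at hgrp
  rw [show PySem.List.dedup ([] : List Int) = [] from rfl, List.map_nil] at hgrp
  simp only [hgrp, List.map_map]
  refine List.map_congr_left ?_
  intro r _
  simp only [Function.comp]
  rw [filter_sorted (fun g => pvKey g "round" == r) (fun g => pvKey g "game_id")]
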